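-- pv_equiv track=rewrite | github.com/teuodor/univeristy | programming fundamentals/btvale/dealuivale.py | bktIter
-- ===== SOURCE A (Python) =====
-- def solutionFound(l,nr):
--     x=[]
--     for i in l:
--         x.append(nr[i])
--     return x
--
-- def solution(l,nr):
--     if len(l) == len(nr):
--         return True
--     return False
--
-- def consistent(l,nr):
--     if len(l)>len(nr):
--         return False
--
--     for i in range(0,len(l)-1):
--         if l[-1]==l[i]:
--             return False
--
--     i=1
--     while i<len(l) and nr[l[i-1]]>nr[l[i]]:
--         i+=1
--
--     if i==len(l):
--         return True
--
--     while i<len(l) and nr[l[i-1]]<nr[l[i]]: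
--         i+=1
--
--     if i == len(l):
--         return True
--
--     return False
--
-- def bktIter(nr):
--     x=[]
--     l=[-1]
--     while len(l)>0:
--         bool = False
--         while bool == False and l[-1] < len(nr)-1:
--             l[-1] += 1
--             bool = consistent(l, nr)
--         if bool:
--             if solution(l, nr):
--                 x.append(solutionFound(l, nr))
--             l.append(-1)
--         else:
--             l=l[:-1]
--     return x
-- ===== SOURCE B (Python) =====
-- def bktIter(nr):
--     # Recursive backtracking with a descending/ascending phase flag instead of
--     # the iterative stack + full-prefix rescan of the original.
--     if not nr:
--         return []
--     n = len(nr)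
--     res = []
--
--     def recurse(path, desc):
--         if len(path) == n:
--             res.append([nr[i] for i in path])
--             return
--         for i in range(n):
--             if i in path:
--                 continue
--             if not path:
--                 recurse(path + [i], True)
--             else:
--                 prev = nr[path[-1]]
--                 cur = nr[i]
--                 if desc and cur < prev:
--                     recurse(path + [i], True)
--                 elif cur > prev:
--                     recurse(path + [i], False)
--
--     recurse([], True)
--     return res
-- ===== Notes on version B (the rewrite author's own statement) =====
-- stated objective: alternative
-- what changed: A drives an explicit stack with an increment-and-test inner loop, re-scanning the whole prefix with consistent() at every step; B is recursive backtracking that carries a descending/ascending phase flag, so each candidate is accepted or rejected by a single comparison against the last chosen value instead of a full prefix re-scan.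
import Mathlib
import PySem

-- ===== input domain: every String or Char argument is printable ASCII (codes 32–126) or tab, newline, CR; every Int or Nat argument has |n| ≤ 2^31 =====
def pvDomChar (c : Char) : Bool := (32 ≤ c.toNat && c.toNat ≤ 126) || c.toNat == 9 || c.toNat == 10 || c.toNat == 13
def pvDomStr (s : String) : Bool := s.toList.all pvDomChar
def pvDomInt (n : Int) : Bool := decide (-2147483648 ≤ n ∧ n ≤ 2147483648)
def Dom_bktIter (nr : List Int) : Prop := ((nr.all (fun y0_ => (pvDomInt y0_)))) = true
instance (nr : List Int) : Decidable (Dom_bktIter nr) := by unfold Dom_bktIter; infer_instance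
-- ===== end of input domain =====

-- B replaces A's iterative stack-and-rescan backtracking by recursive backtracking with a
-- descending/ascending phase flag (objective: alternative decomposition; same enumeration order).


-- ===== PORT A =====
-- value of nr at (possibly computed) index x, total via default 0 (indices are in range on all reachable states)
def pvVal (nr : List Int) (x : Int) : Int := PySem.List.pyGetD nr x 0
-- w l j = nr[l[j]]
def pvW (nr l : List Int) (j : Nat) : Int := pvVal nr (PySem.List.pyGetD l (j : Int) 0)

def pySolutionFound (l nr : List Int) : List Int :=
  l.foldl (fun x i => x ++ [PySem.List.pyGetD nr i 0]) []

def pySolution (l nr : List Int) : Bool := l.length == nr.length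

-- first while loop of consistent: i advances while nr[l[i-1]] > nr[l[i]]
def scanDesc (l nr : List Int) (i : Nat) : Nat :=
  if _h : i < l.length ∧ pvW nr l (i - 1) > pvW nr l i then scanDesc l nr (i + 1) else i
termination_by l.length - i

-- second while loop of consistent
def scanAsc (l nr : List Int) (i : Nat) : Nat :=
  if _h : i < l.length ∧ pvW nr l (i - 1) < pvW nr l i then scanAsc l nr (i + 1) else i
termination_by l.length - i

def consistentA (l nr : List Int) : Bool :=
  if l.length > nr.length then false
  else if ¬ ((List.range (l.length - 1)).all
      (fun i => !(PySem.List.pyGetD l (-1) 0 == PySem.List.pyGetD l (i : Int) 0))) then false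
  else
    if scanDesc l nr 1 = l.length then true
    else if scanAsc l nr (scanDesc l nr 1) = l.length then true else false

-- inner while loop of bktIter: increment l[-1] until consistent or l[-1] ≥ len(nr)-1
def innerA (nr l : List Int) : List Int × Bool :=
  if _h : PySem.List.pyGetD l (-1) 0 < (nr.length : Int) - 1 then
    let l' := PySem.List.slice l none (some (-1)) ++ [PySem.List.pyGetD l (-1) 0 + 1]
    if consistentA l' nr then (l', true) else innerA nr l'
  else (l, false)
termination_by ((nr.length : Int) - 1 - PySem.List.pyGetD l (-1) 0).toNat
decreasing_by
  simp only [PySem.List.slice_to_neg_one, PySem.List.pyGetD_neg_one_append_singleton]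
  omega

-- outer while loop, with fuel (the start fuel in bktIter is provably sufficient)
def outerA (nr : List Int) : Nat → List Int → List (List Int) → List (List Int)
  | 0, _, x => x
  | fuel + 1, l, x =>
    if l = [] then x
    else
      let r := innerA nr l
      if r.2 then
        let x' := if pySolution r.1 nr then x ++ [pySolutionFound r.1 nr] else x
        outerA nr fuel (r.1 ++ [-1]) x'
      else outerA nr fuel (PySem.List.slice r.1 none (some (-1))) x

def bktIter (nr : List Int) : List (List Int) :=
  outerA nr ((nr.length + 2) * (nr.length + 3) ^ (nr.length + 2)) [-1] []

-- ===== PORT B =====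
def bSol (nr path : List Int) : List Int := path.map (fun i => PySem.List.pyGetD nr i 0)

mutual
  -- recurse(path, desc)
  def bRec (nr path : List Int) (desc : Bool) (h : path.length ≤ nr.length) : List (List Int) :=
    if hf : path.length = nr.length then [bSol nr path]
    else bFor nr path desc (by omega) 0
  termination_by (nr.length - path.length, nr.length + 1)
  decreasing_by exact Prod.Lex.right _ (by omega)
  -- the for-loop inside recurse, from candidate i upward; returns the solutions it appends
  def bFor (nr path : List Int) (desc : Bool) (h : path.length < nr.length) (i : Nat) : List (List Int) :=
    if hi : i < nr.length then
      (if (i : Int) ∈ path then []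
       else if path = [] then bRec nr (path ++ [(i : Int)]) true (by simp; omega)
       else if desc && decide (PySem.List.pyGetD nr (i : Int) 0 <
           PySem.List.pyGetD nr (PySem.List.pyGetD path (-1) 0) 0) then
         bRec nr (path ++ [(i : Int)]) true (by simp; omega)
       else if PySem.List.pyGetD nr (i : Int) 0 >
           PySem.List.pyGetD nr (PySem.List.pyGetD path (-1) 0) 0 then
         bRec nr (path ++ [(i : Int)]) false (by simp; omega)
       else []) ++ bFor nr path desc h (i + 1)
    else []
  termination_by (nr.length - path.length, nr.length - i)
  decreasing_by
    · exact Prod.Lex.left _ _ (by simp; omega)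
    · exact Prod.Lex.left _ _ (by simp; omega)
    · exact Prod.Lex.left _ _ (by simp; omega)
    · exact Prod.Lex.right _ (by omega)
end

def bktIter_alt (nr : List Int) : List (List Int) :=
  if nr = [] then [] else bRec nr [] true (by simp)

-- ===== PRECONDITION & SPEC =====
def Spec_bktIter (nr : List Int) (out : List (List Int)) : Prop := out = bktIter_alt nr
instance (nr : List Int) (out : List (List Int)) : Decidable (Spec_bktIter nr out) := by unfold Spec_bktIter; infer_instance

-- ===== CLAIM (what is proved, stated in full; the proofs are below) =====
def Claim_equal_bktIter : Prop := ∀ (nr : List Int), Dom_bktIter nr → Spec_bktIter nr (bktIter nr)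

-- ===== LEMMAS AND PROOFS =====

-- strictly-descending-so-far predicate on the value sequence w (indices 0..m-1)
def DecW (w : Nat → Int) (m : Nat) : Prop := ∀ t, 1 ≤ t → t < m → w (t - 1) > w t

-- valley shape: strictly decreasing up to position k-1, strictly increasing from there on
def ValleyF (w : Nat → Int) (m : Nat) : Prop :=
  ∃ k, 1 ≤ k ∧ k ≤ m ∧ (∀ t, 1 ≤ t → t < k → w (t - 1) > w t) ∧
    (∀ t, k ≤ t → t < m → w (t - 1) < w t)

-- invariant of A's stack
def InvA (nr l : List Int) : Prop :=
  l.length ≤ nr.length + 1 ∧ ∀ a ∈ l, -1 ≤ a ∧ a < (nr.length : Int)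

-- termination measure for A's outer loop (digits (n+1-aᵢ) in base n+3)
def muAux (n : Nat) : Nat → List Int → Nat
  | _, [] => 0
  | e, a :: t => ((n : Int) + 1 - a).toNat * (n + 3) ^ e + muAux n (e - 1) t

def mu (nr l : List Int) : Nat := muAux nr.length (nr.length + 2) l

lemma consistentA_false_of_long {l nr : List Int} (h : l.length > nr.length) :
    consistentA l nr = false := by
  unfold consistentA
  simp [h]

lemma consistentA_length {l nr : List Int} (h : consistentA l nr = true) :
    l.length ≤ nr.length := by
  by_contra hc
  rw [consistentA_false_of_long (by omega)] at h
  exact absurd h (by simp)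

-- DFS subtree enumeration: all solutions found below stack p, trying candidates v, v+1, …
def Tf (nr p : List Int) (v : Int) : List (List Int) :=
  if hv : v < (nr.length : Int) then
    (if hc : consistentA (p ++ [v]) nr = true then
      (if (p ++ [v]).length = nr.length then [pySolutionFound (p ++ [v]) nr] else []) ++
        Tf nr (p ++ [v]) 0
     else []) ++ Tf nr p (v + 1)
  else []
termination_by ((nr.length - p.length : Nat), ((nr.length : Int) - v).toNat)
decreasing_by
  · have := consistentA_length hc
    simp only [List.length_append, List.length_cons, List.length_nil] at this ⊢
    exact Prod.Lex.left _ _ (by omega)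
  · exact Prod.Lex.right _ (by omega)

lemma solutionFound_eq (nr l : List Int) : pySolutionFound l nr = bSol nr l := by
  unfold pySolutionFound bSol
  rw [PySem.List.foldl_append_singleton_eq_map]
  simp

lemma scanDesc_spec (l nr : List Int) (i : Nat) (h1 : 1 ≤ i) (h2 : i ≤ l.length) :
    i ≤ scanDesc l nr i ∧ scanDesc l nr i ≤ l.length ∧
    (∀ t, i ≤ t → t < scanDesc l nr i → pvW nr l (t - 1) > pvW nr l t) ∧
    (scanDesc l nr i < l.length →
      ¬ pvW nr l (scanDesc l nr i - 1) > pvW nr l (scanDesc l nr i)) := by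
  suffices H : ∀ k i, l.length - i ≤ k → 1 ≤ i → i ≤ l.length →
      i ≤ scanDesc l nr i ∧ scanDesc l nr i ≤ l.length ∧
      (∀ t, i ≤ t → t < scanDesc l nr i → pvW nr l (t - 1) > pvW nr l t) ∧
      (scanDesc l nr i < l.length →
        ¬ pvW nr l (scanDesc l nr i - 1) > pvW nr l (scanDesc l nr i)) by
    exact H (l.length - i) i le_rfl h1 h2
  intro k
  induction k with
  | zero =>
    intro i hk h1 h2
    have hi : ¬ (i < l.length ∧ pvW nr l (i - 1) > pvW nr l i) := by
      intro hg; omega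
    rw [scanDesc, dif_neg hi]
    refine ⟨le_rfl, h2, fun t ht1 ht2 => absurd (lt_of_le_of_lt ht1 ht2) (lt_irrefl i), ?_⟩
    intro hlt hgt
    exact hi ⟨hlt, hgt⟩
  | succ k ih =>
    intro i hk h1 h2
    by_cases hg : i < l.length ∧ pvW nr l (i - 1) > pvW nr l i
    · rw [scanDesc, dif_pos hg]
      obtain ⟨s1, s2, s3, s4⟩ := ih (i + 1) (by omega) (by omega) (by omega)
      refine ⟨by omega, s2, ?_, s4⟩
      intro t ht1 ht2
      rcases Nat.eq_or_lt_of_le ht1 with rfl | ht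
      · exact hg.2
      · exact s3 t ht ht2
    · rw [scanDesc, dif_neg hg]
      refine ⟨le_rfl, h2, fun t ht1 ht2 => absurd (lt_of_le_of_lt ht1 ht2) (lt_irrefl i), ?_⟩
      intro hlt hgt
      exact hg ⟨hlt, hgt⟩

lemma scanAsc_spec (l nr : List Int) (i : Nat) (h1 : 1 ≤ i) (h2 : i ≤ l.length) :
    i ≤ scanAsc l nr i ∧ scanAsc l nr i ≤ l.length ∧
    (∀ t, i ≤ t → t < scanAsc l nr i → pvW nr l (t - 1) < pvW nr l t) ∧
    (scanAsc l nr i < l.length →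
      ¬ pvW nr l (scanAsc l nr i - 1) < pvW nr l (scanAsc l nr i)) := by
  suffices H : ∀ k i, l.length - i ≤ k → 1 ≤ i → i ≤ l.length →
      i ≤ scanAsc l nr i ∧ scanAsc l nr i ≤ l.length ∧
      (∀ t, i ≤ t → t < scanAsc l nr i → pvW nr l (t - 1) < pvW nr l t) ∧
      (scanAsc l nr i < l.length →
        ¬ pvW nr l (scanAsc l nr i - 1) < pvW nr l (scanAsc l nr i)) by
    exact H (l.length - i) i le_rfl h1 h2
  intro k
  induction k with
  | zero =>
    intro i hk h1 h2
    have hi : ¬ (i < l.length ∧ pvW nr l (i - 1) < pvW nr l i) := by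
      intro hg; omega
    rw [scanAsc, dif_neg hi]
    refine ⟨le_rfl, h2, fun t ht1 ht2 => absurd (lt_of_le_of_lt ht1 ht2) (lt_irrefl i), ?_⟩
    intro hlt hgt
    exact hi ⟨hlt, hgt⟩
  | succ k ih =>
    intro i hk h1 h2
    by_cases hg : i < l.length ∧ pvW nr l (i - 1) < pvW nr l i
    · rw [scanAsc, dif_pos hg]
      obtain ⟨s1, s2, s3, s4⟩ := ih (i + 1) (by omega) (by omega) (by omega)
      refine ⟨by omega, s2, ?_, s4⟩
      intro t ht1 ht2
      rcases Nat.eq_or_lt_of_le ht1 with rfl | ht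
      · exact hg.2
      · exact s3 t ht ht2
    · rw [scanAsc, dif_neg hg]
      refine ⟨le_rfl, h2, fun t ht1 ht2 => absurd (lt_of_le_of_lt ht1 ht2) (lt_irrefl i), ?_⟩
      intro hlt hgt
      exact hg ⟨hlt, hgt⟩

lemma valley_iff_scan (nr l : List Int) (hl : l ≠ []) :
    ValleyF (pvW nr l) l.length ↔
      (scanDesc l nr 1 = l.length ∨ scanAsc l nr (scanDesc l nr 1) = l.length) := by
  have hm : 1 ≤ l.length := List.length_pos_iff.mpr hl
  obtain ⟨d1, d2, d3, d4⟩ := scanDesc_spec l nr 1 le_rfl hm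
  constructor
  · rintro ⟨k, hk1, hk2, hdec, hasc⟩
    have hjk : scanDesc l nr 1 = k := by
      by_contra hne
      rcases Nat.lt_or_ge (scanDesc l nr 1) k with hlt | hge
      · exact d4 (by omega) (hdec _ (by omega) hlt)
      · have hkj : k < scanDesc l nr 1 := by omega
        have hgt : pvW nr l (k - 1) > pvW nr l k := d3 k hk1 hkj
        have hlt : pvW nr l (k - 1) < pvW nr l k := hasc k le_rfl (by omega)
        omega
    by_cases hfull : scanDesc l nr 1 = l.length
    · exact Or.inl hfull
    · right
      obtain ⟨a1, a2, a3, a4⟩ := scanAsc_spec l nr (scanDesc l nr 1) (by omega) d2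
      by_contra hne
      have hlt : scanAsc l nr (scanDesc l nr 1) < l.length := by omega
      exact a4 hlt (hasc _ (by omega) hlt)
  · intro hsc
    by_cases hfull : scanDesc l nr 1 = l.length
    · exact ⟨l.length, by omega, le_rfl, fun t ht1 ht2 => d3 t ht1 (by omega),
        fun t ht1 ht2 => by omega⟩
    · rcases hsc with hfull' | hascfull
      · exact absurd hfull' hfull
      · obtain ⟨a1, a2, a3, a4⟩ := scanAsc_spec l nr (scanDesc l nr 1) (by omega) d2
        exact ⟨scanDesc l nr 1, by omega, d2, fun t ht1 ht2 => d3 t ht1 ht2,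
          fun t ht1 ht2 => a3 t ht1 (by omega)⟩

lemma consistentA_true_iff (l nr : List Int) (hl : l ≠ []) :
    consistentA l nr = true ↔
      l.length ≤ nr.length ∧
      (∀ j < l.length - 1, PySem.List.pyGetD l (-1) 0 ≠ PySem.List.pyGetD l (j : Int) 0) ∧
      ValleyF (pvW nr l) l.length := by
  unfold consistentA
  by_cases h1 : l.length > nr.length
  · rw [if_pos h1]
    simp only [Bool.false_eq_true, false_iff]
    rintro ⟨hlen, -⟩; omega
  · rw [if_neg h1]
    have hdup : ((List.range (l.length - 1)).all
        (fun j => !(PySem.List.pyGetD l (-1) 0 == PySem.List.pyGetD l (j : Int) 0)) = true) ↔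
        (∀ j < l.length - 1, PySem.List.pyGetD l (-1) 0 ≠ PySem.List.pyGetD l (j : Int) 0) := by
      simp [List.all_eq_true]
    by_cases h2 : ∀ j < l.length - 1, PySem.List.pyGetD l (-1) 0 ≠ PySem.List.pyGetD l (j : Int) 0
    · rw [if_neg (by simp only [hdup.mpr h2]; simp)]
      constructor
      · intro hh
        refine ⟨by omega, h2, (valley_iff_scan nr l hl).mpr ?_⟩
        split_ifs at hh with hi hii
        · exact Or.inl hi
        · exact Or.inr hii
      · rintro ⟨-, -, hV⟩
        rcases (valley_iff_scan nr l hl).mp hV with hi | hii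
        · simp [hi]
        · simp [hii]
    · rw [if_pos (by simp only [Bool.not_eq_true]; rw [Bool.eq_false_iff]; intro hh; exact h2 (hdup.mp hh))]
      simp only [Bool.false_eq_true, false_iff]
      rintro ⟨-, hd, -⟩; exact h2 hd

-- ===== mu lemmas =====

lemma muAux_append (n : Nat) (c : Int) :
    ∀ (p : List Int) (e : Nat), p.length ≤ e →
      muAux n e (p ++ [c]) = muAux n e p + ((n : Int) + 1 - c).toNat * (n + 3) ^ (e - p.length) := by
  intro p
  induction p with
  | nil => intro e he; simp [muAux]
  | cons a t ih =>
    intro e he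
    simp only [List.cons_append, muAux]
    rw [ih (e - 1) (by simp at he; omega)]
    have hE : e - 1 - t.length = e - (a :: t).length := by simp; omega
    rw [hE]
    ring

lemma mu_snoc (nr : List Int) (p : List Int) (c : Int) (h : p.length ≤ nr.length + 2) :
    mu nr (p ++ [c]) =
      mu nr p + ((nr.length : Int) + 1 - c).toNat * (nr.length + 3) ^ (nr.length + 2 - p.length) := by
  exact muAux_append nr.length c p (nr.length + 2) h

lemma mu_lt_mu_of_lt (nr p : List Int) {c i : Int} (hp : p.length ≤ nr.length + 1)
    (h1 : c < i) (h2 : i < (nr.length : Int)) :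
    mu nr (p ++ [i]) < mu nr (p ++ [c]) := by
  rw [mu_snoc nr p i (by omega), mu_snoc nr p c (by omega)]
  have hpos : 0 < (nr.length + 3) ^ (nr.length + 2 - p.length) := Nat.pow_pos (by omega)
  have hd : ((nr.length : Int) + 1 - i).toNat < ((nr.length : Int) + 1 - c).toNat := by omega
  exact Nat.add_lt_add_left ((Nat.mul_lt_mul_right hpos).mpr hd) _

lemma mu_push_lt (nr p : List Int) {c i : Int} (hp : p.length + 1 ≤ nr.length)
    (h1 : c < i) (h2 : i < (nr.length : Int)) :
    mu nr ((p ++ [i]) ++ [-1]) < mu nr (p ++ [c]) := by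
  rw [mu_snoc nr (p ++ [i]) (-1) (by simp; omega), mu_snoc nr p i (by omega),
    mu_snoc nr p c (by omega)]
  simp only [List.length_append, List.length_cons, List.length_nil]
  have hE : nr.length + 2 - (p.length + 0 + 1) = (nr.length + 1 - p.length) := by omega
  have hE2 : nr.length + 2 - p.length = (nr.length + 1 - p.length) + 1 := by omega
  rw [hE, hE2, pow_succ]
  set P : Nat := (nr.length + 3) ^ (nr.length + 1 - p.length) with hP
  have hPpos : 0 < P := Nat.pow_pos (by omega)
  have hd : ((nr.length : Int) + 1 - i).toNat + 1 ≤ ((nr.length : Int) + 1 - c).toNat := by omega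
  have hm1 : ((nr.length : Int) + 1 - (-1)).toNat = nr.length + 2 := by omega
  rw [hm1]
  have h3 : ((nr.length : Int) + 1 - i).toNat * (P * (nr.length + 3)) + P * (nr.length + 3) ≤
      ((nr.length : Int) + 1 - c).toNat * (P * (nr.length + 3)) := by
    have := Nat.mul_le_mul_right (k := P * (nr.length + 3)) hd
    rwa [add_mul, one_mul] at this
  have h4 : (nr.length + 2) * P < P * (nr.length + 3) := by
    rw [Nat.mul_comm P]
    exact (Nat.mul_lt_mul_right hPpos).mpr (by omega)
  linarith [h3, h4]

lemma mu_pop_le (nr p : List Int) {c : Int} (hp : p.length ≤ nr.length + 1)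
    (h1 : -1 ≤ c) (h2 : c < (nr.length : Int)) :
    mu nr p + 2 ≤ mu nr (p ++ [c]) := by
  rw [mu_snoc nr p c (by omega)]
  have hpos : 0 < (nr.length + 3) ^ (nr.length + 2 - p.length) := Nat.pow_pos (by omega)
  have hd : 2 ≤ ((nr.length : Int) + 1 - c).toNat := by omega
  calc mu nr p + 2 ≤ mu nr p + ((nr.length : Int) + 1 - c).toNat * 1 := by omega
    _ ≤ mu nr p + ((nr.length : Int) + 1 - c).toNat * (nr.length + 3) ^ (nr.length + 2 - p.length) := by
        exact Nat.add_le_add_left (Nat.mul_le_mul_left _ hpos) _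

-- ===== inner loop characterisation =====

lemma inner_char (nr p : List Int) (c : Int) :
    (∃ i : Int, c < i ∧ i < (nr.length : Int) ∧ consistentA (p ++ [i]) nr = true ∧
      innerA nr (p ++ [c]) = (p ++ [i], true) ∧
      Tf nr p (c + 1) =
        ((if (p ++ [i]).length = nr.length then [pySolutionFound (p ++ [i]) nr] else []) ++
          Tf nr (p ++ [i]) 0) ++ Tf nr p (i + 1))
    ∨ ((innerA nr (p ++ [c])).2 = false ∧
        (∃ c' : Int, c ≤ c' ∧ (innerA nr (p ++ [c])).1 = p ++ [c']) ∧
        Tf nr p (c + 1) = []) := by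
  suffices H : ∀ (k : Nat) (c : Int), ((nr.length : Int) - 1 - c).toNat ≤ k →
      (∃ i : Int, c < i ∧ i < (nr.length : Int) ∧ consistentA (p ++ [i]) nr = true ∧
        innerA nr (p ++ [c]) = (p ++ [i], true) ∧
        Tf nr p (c + 1) =
          ((if (p ++ [i]).length = nr.length then [pySolutionFound (p ++ [i]) nr] else []) ++
            Tf nr (p ++ [i]) 0) ++ Tf nr p (i + 1))
      ∨ ((innerA nr (p ++ [c])).2 = false ∧
          (∃ c' : Int, c ≤ c' ∧ (innerA nr (p ++ [c])).1 = p ++ [c']) ∧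
          Tf nr p (c + 1) = []) by
    exact H _ c le_rfl
  intro k
  induction k with
  | zero =>
    intro c hk
    right
    have hguard : ¬ (PySem.List.pyGetD (p ++ [c]) (-1) 0 < (nr.length : Int) - 1) := by
      rw [PySem.List.pyGetD_neg_one_append_singleton]; omega
    rw [innerA, dif_neg hguard]
    refine ⟨rfl, ⟨c, le_rfl, rfl⟩, ?_⟩
    rw [Tf, dif_neg (by omega)]
  | succ k ih =>
    intro c hk
    by_cases hguard : c < (nr.length : Int) - 1
    · rw [innerA, dif_pos (by rw [PySem.List.pyGetD_neg_one_append_singleton]; exact hguard)]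
      simp only [PySem.List.slice_to_neg_one, PySem.List.pyGetD_neg_one_append_singleton,
        List.dropLast_concat]
      by_cases hcons : consistentA (p ++ [c + 1]) nr = true
      · rw [if_pos hcons]
        refine Or.inl ⟨c + 1, by omega, by omega, hcons, rfl, ?_⟩
        conv_lhs => rw [Tf]
        rw [dif_pos (by omega : (c + 1) < (nr.length : Int)), dif_pos hcons]
      · rw [if_neg hcons]
        have hTf : Tf nr p (c + 1) = Tf nr p (c + 1 + 1) := by
          conv_lhs => rw [Tf]
          rw [dif_pos (by omega : (c + 1) < (nr.length : Int)), dif_neg hcons]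
          simp
        rcases ih (c + 1) (by omega) with ⟨i, hi1, hi2, hi3, hi4, hi5⟩ | ⟨h1, ⟨c', hc1, hc2⟩, h3⟩
        · refine Or.inl ⟨i, by omega, hi2, hi3, hi4, ?_⟩
          rw [hTf]; exact hi5
        · refine Or.inr ⟨h1, ⟨c', by omega, hc2⟩, ?_⟩
          rw [hTf]; exact h3
    · right
      have hguard' : ¬ (PySem.List.pyGetD (p ++ [c]) (-1) 0 < (nr.length : Int) - 1) := by
        rw [PySem.List.pyGetD_neg_one_append_singleton]; exact hguard
      rw [innerA, dif_neg hguard']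
      refine ⟨rfl, ⟨c, le_rfl, rfl⟩, ?_⟩
      rw [Tf, dif_neg (by omega)]

lemma outer_nil (nr : List Int) (f : Nat) (x : List (List Int)) :
    outerA nr f [] x = x := by
  cases f <;> simp [outerA]

lemma outer_fuel_irrel (nr : List Int) :
    ∀ (m : Nat) (l : List Int) (x : List (List Int)) (f₁ f₂ : Nat), InvA nr l →
      mu nr l ≤ m → mu nr l ≤ f₁ → mu nr l ≤ f₂ →
      outerA nr f₁ l x = outerA nr f₂ l x := by
  intro m
  induction m using Nat.strong_induction_on with
  | _ m IH =>
    intro l x f₁ f₂ hInv hm h1 h2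
    rcases List.eq_nil_or_concat' l with rfl | ⟨p, c, rfl⟩
    · rw [outer_nil, outer_nil]
    · have hc := hInv.2 c (by simp)
      have hlen : p.length ≤ nr.length := by
        have := hInv.1; simp only [List.length_append, List.length_cons, List.length_nil] at this
        omega
      have hmu2 : mu nr p + 2 ≤ mu nr (p ++ [c]) := mu_pop_le nr p (by omega) hc.1 hc.2
      obtain ⟨g₁, rfl⟩ : ∃ g, f₁ = g + 1 := ⟨f₁ - 1, by omega⟩
      obtain ⟨g₂, rfl⟩ : ∃ g, f₂ = g + 1 := ⟨f₂ - 1, by omega⟩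
      have hne : ¬(p ++ [c] = []) := by simp
      rcases inner_char nr p c with ⟨i, hi1, hi2, hi3, hi4, -⟩ | ⟨h5, ⟨c', hc'1, hc'2⟩, -⟩
      · have hplen : p.length + 1 ≤ nr.length := by
          have := consistentA_length hi3
          simp only [List.length_append, List.length_cons, List.length_nil] at this; omega
        have hpush : mu nr ((p ++ [i]) ++ [-1]) < mu nr (p ++ [c]) :=
          mu_push_lt nr p hplen hi1 hi2
        have hInv' : InvA nr ((p ++ [i]) ++ [-1]) := by
          constructor
          · simp only [List.length_append, List.length_cons, List.length_nil]; omega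
          · intro a ha
            simp only [List.mem_append, List.mem_singleton] at ha
            rcases ha with (ha | rfl) | rfl
            · exact hInv.2 a (by simp [ha])
            · constructor <;> omega
            · constructor <;> omega
        simp only [outerA, hi4, hne, if_false]
        exact IH (mu nr ((p ++ [i]) ++ [-1])) (by omega) _ _ _ _ hInv' le_rfl (by omega) (by omega)
      · have hInvp : InvA nr p := by
          refine ⟨by omega, fun a ha => hInv.2 a (by simp [ha])⟩
        simp only [outerA, hne, if_false, h5, hc'2, Bool.false_eq_true,
          PySem.List.slice_to_neg_one, List.dropLast_concat]
        exact IH (mu nr p) (by omega) _ _ _ _ hInvp le_rfl (by omega) (by omega)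

lemma outer_pop (nr : List Int) :
    ∀ (m : Nat) (p : List Int) (c : Int) (x : List (List Int)) (f f' : Nat),
      InvA nr (p ++ [c]) → mu nr (p ++ [c]) ≤ m → mu nr (p ++ [c]) ≤ f → mu nr p ≤ f' →
      outerA nr f (p ++ [c]) x = outerA nr f' p (x ++ Tf nr p (c + 1)) := by
  intro m
  induction m using Nat.strong_induction_on with
  | _ m IH =>
    intro p c x f f' hInv hm hf hf'
    have hc := hInv.2 c (by simp)
    have hlen : p.length ≤ nr.length := by
      have := hInv.1; simp only [List.length_append, List.length_cons, List.length_nil] at this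
      omega
    have hmu2 : mu nr p + 2 ≤ mu nr (p ++ [c]) := mu_pop_le nr p (by omega) hc.1 hc.2
    obtain ⟨g, rfl⟩ : ∃ g, f = g + 1 := ⟨f - 1, by omega⟩
    have hne : ¬(p ++ [c] = []) := by simp
    rcases inner_char nr p c with ⟨i, hi1, hi2, hi3, hi4, hi5⟩ | ⟨h5, ⟨c', hc'1, hc'2⟩, h6⟩
    · have hplen : p.length + 1 ≤ nr.length := by
        have := consistentA_length hi3
        simp only [List.length_append, List.length_cons, List.length_nil] at this; omega
      have hpush : mu nr ((p ++ [i]) ++ [-1]) < mu nr (p ++ [c]) :=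
        mu_push_lt nr p hplen hi1 hi2
      have hdrop : mu nr (p ++ [i]) < mu nr (p ++ [c]) :=
        mu_lt_mu_of_lt nr p (by omega) hi1 hi2
      have hInv' : InvA nr ((p ++ [i]) ++ [-1]) := by
        constructor
        · simp only [List.length_append, List.length_cons, List.length_nil]; omega
        · intro a ha
          simp only [List.mem_append, List.mem_singleton] at ha
          rcases ha with (ha | rfl) | rfl
          · exact hInv.2 a (by simp [ha])
          · constructor <;> omega
          · constructor <;> omega
      have hInvi : InvA nr (p ++ [i]) := by
        constructor
        · simp only [List.length_append, List.length_cons, List.length_nil]; omega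
        · intro a ha
          simp only [List.mem_append, List.mem_singleton] at ha
          rcases ha with ha | rfl
          · exact hInv.2 a (by simp [ha])
          · constructor <;> omega
      -- unfold one outer iteration
      have e1 : outerA nr (g + 1) (p ++ [c]) x =
          outerA nr g ((p ++ [i]) ++ [-1])
            (if pySolution (p ++ [i]) nr then x ++ [pySolutionFound (p ++ [i]) nr] else x) := by
        simp only [outerA, hi4, hne, if_false]
        simp
      have e2 := IH (mu nr ((p ++ [i]) ++ [-1])) (by omega) (p ++ [i]) (-1)
        (if pySolution (p ++ [i]) nr then x ++ [pySolutionFound (p ++ [i]) nr] else x)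
        g (mu nr (p ++ [i])) hInv' le_rfl (by omega) le_rfl
      have e3 := IH (mu nr (p ++ [i])) (by omega) p i
        ((if pySolution (p ++ [i]) nr then x ++ [pySolutionFound (p ++ [i]) nr] else x) ++
          Tf nr (p ++ [i]) 0)
        (mu nr (p ++ [i])) f' hInvi le_rfl le_rfl hf'
      rw [e1, e2, show (-1 : Int) + 1 = 0 by ring, e3, hi5]
      congr 1
      have hx' : (if pySolution (p ++ [i]) nr then x ++ [pySolutionFound (p ++ [i]) nr] else x) =
          x ++ (if (p ++ [i]).length = nr.length then [pySolutionFound (p ++ [i]) nr] else []) := by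
        unfold pySolution
        simp only [beq_iff_eq]
        split_ifs <;> simp_all
      rw [hx']
      simp [List.append_assoc]
    · have hInvp : InvA nr p := ⟨by omega, fun a ha => hInv.2 a (by simp [ha])⟩
      have e1 : outerA nr (g + 1) (p ++ [c]) x = outerA nr g p x := by
        simp only [outerA, hne, if_false, h5, hc'2, Bool.false_eq_true,
          PySem.List.slice_to_neg_one, List.dropLast_concat]
      rw [e1, h6, List.append_nil]
      exact outer_fuel_irrel nr (mu nr p) p x g f' hInvp le_rfl (by omega) (by omega)

lemma bktIter_eq_Tf (nr : List Int) : bktIter nr = Tf nr [] 0 := by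
  have hInv : InvA nr ([] ++ [-1]) := by
    refine ⟨by simp, ?_⟩
    intro a ha
    simp only [List.nil_append, List.mem_singleton] at ha
    subst ha
    constructor <;> omega
  have hmu : mu nr ([] ++ [-1]) = (nr.length + 2) * (nr.length + 3) ^ (nr.length + 2) := by
    rw [mu_snoc nr [] (-1) (by simp)]
    simp [mu, muAux]
    omega
  have h := outer_pop nr (mu nr ([] ++ [-1])) [] (-1) []
    ((nr.length + 2) * (nr.length + 3) ^ (nr.length + 2)) 0 hInv le_rfl (le_of_eq hmu)
    (by simp [mu, muAux])
  rw [outer_nil] at h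
  simp only [List.nil_append] at h
  rw [show (-1 : Int) + 1 = 0 by ring] at h
  unfold bktIter
  simpa using h

-- ===== B side =====

lemma Tf_full (nr : List Int) : ∀ (j : Nat) (p : List Int) (v : Int),
    nr.length ≤ p.length → (nr.length : Int) ≤ v + j → Tf nr p v = [] := by
  intro j
  induction j with
  | zero => intro p v hp hv; rw [Tf, dif_neg (by omega)]
  | succ j ih =>
    intro p v hp hv
    by_cases hvn : v < (nr.length : Int)
    · rw [Tf, dif_pos hvn]
      have hcons : ¬ consistentA (p ++ [v]) nr = true := by
        rw [consistentA_false_of_long (by simp; omega)]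
        simp
      rw [dif_neg hcons, List.nil_append]
      exact ih p (v + 1) hp (by omega)
    · rw [Tf, dif_neg hvn]

lemma pvW_snoc_lt (nr p : List Int) (v : Int) (j : Nat) (h : j < p.length) :
    pvW nr (p ++ [v]) j = pvW nr p j := by
  unfold pvW
  congr 1
  simp only [PySem.List.pyGetD_natCast]
  rw [List.getD_append _ _ _ _ h]

lemma pvW_snoc_last (nr p : List Int) (v : Int) :
    pvW nr (p ++ [v]) p.length = pvVal nr v := by
  unfold pvW pvVal
  congr 1
  simp only [PySem.List.pyGetD_natCast]
  rw [List.getD_append_right _ _ _ _ le_rfl]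
  simp

lemma last_eq_pvW (nr p : List Int) (h : p ≠ []) :
    PySem.List.pyGetD nr (PySem.List.pyGetD p (-1) 0) 0 = pvW nr p (p.length - 1) := by
  unfold pvW pvVal
  congr 1
  rw [PySem.List.pyGetD_neg_one p 0 h, PySem.List.pyGetD_natCast]
  have hlt : p.length - 1 < p.length := by
    have : 0 < p.length := List.length_pos_iff.mpr h
    omega
  rw [List.getD_eq_getElem _ _ hlt, List.getLast_eq_getElem]

lemma valley_snoc (w w' : Nat → Int) (m : Nat) (x : Int) (hm : 1 ≤ m)
    (hagree : ∀ j < m, w' j = w j) (hx : w' m = x) (hV : ValleyF w m) :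
    ValleyF w' (m + 1) ↔
      ((DecW w m ∧ x ≠ w (m - 1)) ∨ (¬ DecW w m ∧ w (m - 1) < x)) := by
  constructor
  · rintro ⟨k, hk1, hk2, hdec, hasc⟩
    by_cases hD : DecW w m
    · left
      refine ⟨hD, ?_⟩
      by_cases hkm : m < k
      · have := hdec m (by omega) (by omega)
        rw [hagree (m - 1) (by omega), hx] at this; omega
      · have := hasc m (by omega) (by omega)
        rw [hagree (m - 1) (by omega), hx] at this; omega
    · right
      refine ⟨hD, ?_⟩
      obtain ⟨t0, ht01, ht0m, hng⟩ : ∃ t0, 1 ≤ t0 ∧ t0 < m ∧ ¬ w (t0 - 1) > w t0 := by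
        unfold DecW at hD; push Not at hD
        obtain ⟨t0, h1, h2, h3⟩ := hD
        exact ⟨t0, h1, h2, by omega⟩
      have hkt : k ≤ t0 := by
        by_contra hkt
        push Not at hkt
        have := hdec t0 ht01 (by omega)
        rw [hagree (t0 - 1) (by omega), hagree t0 (by omega)] at this
        omega
      have := hasc m (by omega) (by omega)
      rwa [hagree (m - 1) (by omega), hx] at this
  · rintro (⟨hD, hne⟩ | ⟨hD, hlt⟩)
    · rcases lt_or_gt_of_ne hne with hlt | hgt
      · refine ⟨m + 1, by omega, by omega, ?_, ?_⟩
        · intro t ht1 ht2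
          by_cases htm : t = m
          · subst htm; rw [hagree (t - 1) (by omega), hx]; omega
          · rw [hagree (t - 1) (by omega), hagree t (by omega)]
            exact hD t ht1 (by omega)
        · intro t ht1 ht2; omega
      · refine ⟨m, hm, by omega, ?_, ?_⟩
        · intro t ht1 ht2
          rw [hagree (t - 1) (by omega), hagree t (by omega)]
          exact hD t ht1 (by omega)
        · intro t ht1 ht2
          have htm : t = m := by omega
          subst htm
          rw [hagree (t - 1) (by omega), hx]
          exact hgt
    · obtain ⟨k0, hk01, hk0m, hdec0, hasc0⟩ := hV
      refine ⟨k0, hk01, by omega, ?_, ?_⟩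
      · intro t ht1 ht2
        rw [hagree (t - 1) (by omega), hagree t (by omega)]
        exact hdec0 t ht1 ht2
      · intro t ht1 ht2
        by_cases htm : t = m
        · subst htm; rw [hagree (t - 1) (by omega), hx]; exact hlt
        · rw [hagree (t - 1) (by omega), hagree t (by omega)]
          exact hasc0 t ht1 (by omega)

lemma dec_snoc (w w' : Nat → Int) (m : Nat) (x : Int) (hm : 1 ≤ m)
    (hagree : ∀ j < m, w' j = w j) (hx : w' m = x) :
    DecW w' (m + 1) ↔ (DecW w m ∧ w (m - 1) > x) := by
  constructor
  · intro hd
    refine ⟨fun t ht1 ht2 => ?_, ?_⟩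
    · have := hd t ht1 (by omega)
      rwa [hagree (t - 1) (by omega), hagree t (by omega)] at this
    · have := hd m hm (by omega)
      rwa [hagree (m - 1) (by omega), hx] at this
  · rintro ⟨hd, hgt⟩ t ht1 ht2
    by_cases htm : t = m
    · subst htm
      rw [hagree (t - 1) (by omega), hx]
      exact hgt
    · rw [hagree (t - 1) (by omega), hagree t (by omega)]
      exact hd t ht1 (by omega)

lemma consistent_snoc (nr p : List Int) (desc : Bool) (i : Nat)
    (hi : i < nr.length) (hlen : p.length < nr.length)
    (hV : p ≠ [] → ValleyF (pvW nr p) p.length)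
    (hd : desc = true ↔ DecW (pvW nr p) p.length) :
    consistentA (p ++ [(i : Int)]) nr = true ↔
      ((i : Int) ∉ p ∧ (p = [] ∨
        (desc = true ∧ pvVal nr i < pvW nr p (p.length - 1)) ∨
        pvW nr p (p.length - 1) < pvVal nr i)) := by
  rw [consistentA_true_iff _ nr (by simp)]
  have hlen2 : (p ++ [(i : Int)]).length ≤ nr.length := by simp; omega
  have hdup : (∀ j < (p ++ [(i : Int)]).length - 1,
      PySem.List.pyGetD (p ++ [(i : Int)]) (-1) 0 ≠ PySem.List.pyGetD (p ++ [(i : Int)]) (j : Int) 0) ↔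
      (i : Int) ∉ p := by
    simp only [PySem.List.pyGetD_neg_one_append_singleton, PySem.List.pyGetD_natCast,
      List.length_append, List.length_cons, List.length_nil]
    constructor
    · intro hh hmem
      obtain ⟨j, hj, hjv⟩ := List.getElem_of_mem hmem
      refine hh j (by omega) ?_
      rw [List.getD_append _ _ _ _ hj, List.getD_eq_getElem _ _ hj, hjv]
    · intro hmem j hj
      have hj' : j < p.length := by omega
      rw [List.getD_append _ _ _ _ hj', List.getD_eq_getElem _ _ hj']
      intro hEq
      exact hmem (hEq ▸ List.getElem_mem hj')
  by_cases hp : p = []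
  · subst hp
    simp only [List.nil_append, List.length_cons, List.length_nil]
    constructor
    · rintro ⟨-, -, -⟩
      exact ⟨by simp, Or.inl trivial⟩
    · rintro ⟨-, -⟩
      refine ⟨by omega, ?_, ?_⟩
      · intro j hj; simp at hj
      · exact ⟨1, le_rfl, le_rfl, fun t ht1 ht2 => by omega, fun t ht1 ht2 => by omega⟩
  · have hm : 1 ≤ p.length := List.length_pos_iff.mpr hp
    have hVS := valley_snoc (pvW nr p) (pvW nr (p ++ [(i : Int)])) p.length (pvVal nr i) hm
      (fun j hj => pvW_snoc_lt nr p _ j hj) (pvW_snoc_last nr p _) (hV hp)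
    simp only [List.length_append, List.length_cons, List.length_nil]
    have hlen3 : p.length + 0 + 1 = p.length + 1 := by omega
    constructor
    · rintro ⟨-, hdupv, hVal⟩
      refine ⟨hdup.mp (by simpa using hdupv), ?_⟩
      have := hVS.mp (by simpa [hlen3] using hVal)
      rcases this with ⟨hD, hne⟩ | ⟨hD, hlt⟩
      · rcases lt_or_gt_of_ne hne with h1 | h1
        · exact Or.inr (Or.inl ⟨hd.mpr hD, h1⟩)
        · exact Or.inr (Or.inr h1)
      · exact Or.inr (Or.inr hlt)
    · rintro ⟨hmem, hshape⟩
      refine ⟨by omega, by simpa using hdup.mpr hmem, ?_⟩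
      have : ValleyF (pvW nr (p ++ [(i : Int)])) (p.length + 1) := by
        apply hVS.mpr
        rcases hshape with hpe | ⟨hdt, hcur⟩ | hcur
        · exact absurd hpe hp
        · exact Or.inl ⟨hd.mp hdt, by omega⟩
        · by_cases hD : DecW (pvW nr p) p.length
          · exact Or.inl ⟨hD, by omega⟩
          · exact Or.inr ⟨hD, hcur⟩
      simpa [hlen3] using this

lemma E_for (nr : List Int) :
    ∀ (K : Nat) (p : List Int) (desc : Bool) (h : p.length < nr.length),
      nr.length - p.length ≤ K →
      (p ≠ [] → ValleyF (pvW nr p) p.length) →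
      (desc = true ↔ DecW (pvW nr p) p.length) →
      ∀ i : Nat, bFor nr p desc h i = Tf nr p (i : Int) := by
  intro K
  induction K using Nat.strong_induction_on with
  | _ K IH =>
    intro p desc h hK hV hd
    suffices Haux : ∀ (j i : Nat), nr.length ≤ i + j → bFor nr p desc h i = Tf nr p (i : Int) by
      intro i; exact Haux nr.length i (by omega)
    intro j
    induction j with
    | zero =>
      intro i hij
      rw [bFor, dif_neg (by omega), Tf, dif_neg (by omega)]
    | succ j ihj =>
      intro i hij
      by_cases hi : i < nr.length
      case neg => rw [bFor, dif_neg hi, Tf, dif_neg (by omega)]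
      case pos =>
      rw [bFor, dif_pos hi]
      conv_rhs => rw [Tf]
      rw [dif_pos (by exact_mod_cast hi)]
      have htail : bFor nr p desc h (i + 1) = Tf nr p ((i : Int) + 1) := by
        have := ihj (i + 1) (by omega)
        rw [this]
        norm_num
      have hchar := consistent_snoc nr p desc i hi h hV hd
      have hstep : ∀ (d' : Bool), consistentA (p ++ [(i : Int)]) nr = true →
          (d' = true ↔ DecW (pvW nr (p ++ [(i : Int)])) (p ++ [(i : Int)]).length) →
          ∀ (hle : (p ++ [(i : Int)]).length ≤ nr.length),
          bRec nr (p ++ [(i : Int)]) d' hle =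
            (if (p ++ [(i : Int)]).length = nr.length then [pySolutionFound (p ++ [(i : Int)]) nr]
              else []) ++ Tf nr (p ++ [(i : Int)]) 0 := by
        intro d' hcons hd' hle
        rw [bRec]
        by_cases hfull : (p ++ [(i : Int)]).length = nr.length
        · rw [dif_pos hfull, if_pos hfull]
          rw [Tf_full nr nr.length (p ++ [(i : Int)]) 0 (by omega) (by omega)]
          rw [solutionFound_eq]
          simp
        · rw [dif_neg hfull, if_neg hfull, List.nil_append]
          have hlt : (p ++ [(i : Int)]).length < nr.length := by omega
          have hVnew : (p ++ [(i : Int)]) ≠ [] → ValleyF (pvW nr (p ++ [(i : Int)]))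
              (p ++ [(i : Int)]).length := by
            intro _
            exact ((consistentA_true_iff _ nr (by simp)).mp hcons).2.2
          have := IH (K - 1) (by simp at hlt; omega) (p ++ [(i : Int)]) d' hlt
            (by simp at hlt ⊢; omega) hVnew hd' 0
          simpa using this
      by_cases hmem : (i : Int) ∈ p
      · rw [if_pos hmem]
        have hcons : ¬ consistentA (p ++ [(i : Int)]) nr = true := by
          intro hc
          exact (hchar.mp hc).1 hmem
        rw [dif_neg hcons, htail]
      · rw [if_neg hmem]
        by_cases hpe : p = []
        · rw [if_pos hpe]
          have hcons : consistentA (p ++ [(i : Int)]) nr = true :=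
            hchar.mpr ⟨hmem, Or.inl hpe⟩
          rw [dif_pos hcons, htail]
          congr 1
          refine hstep true hcons ?_ _
          subst hpe
          simp only [List.nil_append, List.length_cons, List.length_nil]
          constructor
          · intro _ t ht1 ht2; omega
          · intro _; trivial
        · rw [if_neg hpe]
          have hpv : PySem.List.pyGetD nr (PySem.List.pyGetD p (-1) 0) 0 =
              pvW nr p (p.length - 1) := last_eq_pvW nr p hpe
          have hm1 : 1 ≤ p.length := List.length_pos_iff.mpr hpe
          have hDS := dec_snoc (pvW nr p) (pvW nr (p ++ [(i : Int)])) p.length (pvVal nr i) hm1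
            (fun j hj => pvW_snoc_lt nr p _ j hj) (pvW_snoc_last nr p _)
          by_cases hacc1 : desc = true ∧ pvVal nr i < pvW nr p (p.length - 1)
          · rw [if_pos (by simp only [hacc1.1, Bool.true_and, decide_eq_true_eq, hpv]; exact hacc1.2)]
            have hcons : consistentA (p ++ [(i : Int)]) nr = true :=
              hchar.mpr ⟨hmem, Or.inr (Or.inl hacc1)⟩
            rw [dif_pos hcons, htail]
            congr 1
            refine hstep true hcons ?_ _
            constructor
            · intro _
              have : DecW (pvW nr (p ++ [(i : Int)])) (p.length + 1) :=
                hDS.mpr ⟨hd.mp hacc1.1, by have := hacc1.2; omega⟩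
              simpa using this
            · intro _; trivial
          · by_cases hacc2 : pvW nr p (p.length - 1) < pvVal nr i
            · rw [if_neg (by simp only [Bool.and_eq_true, decide_eq_true_eq, hpv]; rintro ⟨h1, h2⟩; exact hacc1 ⟨h1, h2⟩)]
              rw [if_pos (by show PySem.List.pyGetD nr (i : Int) 0 > _; rw [hpv]; exact hacc2)]
              have hcons : consistentA (p ++ [(i : Int)]) nr = true :=
                hchar.mpr ⟨hmem, Or.inr (Or.inr hacc2)⟩
              rw [dif_pos hcons, htail]
              congr 1
              refine hstep false hcons ?_ _
              constructor
              · intro hfalse; exact absurd hfalse (by simp)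
              · intro hDnew
                exfalso
                have := hDS.mp (by simpa using hDnew)
                omega
            · rw [if_neg (by simp only [Bool.and_eq_true, decide_eq_true_eq, hpv]; rintro ⟨h1, h2⟩; exact hacc1 ⟨h1, h2⟩)]
              rw [if_neg (by show ¬ PySem.List.pyGetD nr (i : Int) 0 > _; rw [hpv]; exact hacc2)]
              have hcons : ¬ consistentA (p ++ [(i : Int)]) nr = true := by
                intro hc
                rcases (hchar.mp hc).2 with h1 | h1 | h1
                · exact hpe h1
                · exact hacc1 h1
                · exact hacc2 h1
              rw [dif_neg hcons, htail]

-- ===== VERDICT =====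
theorem bktIter_spec : Claim_equal_bktIter := by
  intro nr _
  unfold Spec_bktIter
  rw [bktIter_eq_Tf]
  unfold bktIter_alt
  split_ifs with h
  · subst h
    rw [Tf]; simp
  · rw [bRec]
    split_ifs with hf
    · -- nr.length = 0 impossible since nr ≠ []
      exact absurd (List.length_eq_zero_iff.mp (by simpa using hf.symm)) h
    · rw [E_for nr nr.length [] true _ (by omega) (by simp) (by simp [DecW])]
      rfl
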